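-- pv_equiv track=rewrite | github.com/leohafsa/Custom_Ai_chatbot_Mdiagnosis | all_versions/app_rem_med.py | find_sentences_with_word
-- ===== SOURCE A (Python) =====
-- def find_sentences_with_word(sentences, target_word,stop_word):
--     result_list = []
--     check = False
--     for sentence in sentences:
--         if target_word in sentence:
--             #result_list.append(sentence)
--             check = True
--         if stop_word in sentence:
--                break
--         if check == True:
--              result_list.append(sentence)
--     return result_list
-- ===== SOURCE B (Python) =====
-- def find_sentences_with_word(sentences, target_word, stop_word):
--     sentences = list(sentences)
--     j = len(sentences)
--     for idx, s in enumerate(sentences):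
--         if stop_word in s:
--             j = idx
--             break
--     for i, s in enumerate(sentences[:j]):
--         if target_word in s:
--             return sentences[i:j]
--     return []
-- ===== Notes on version B (the rewrite author's own statement) =====
-- stated objective: simpler
-- what changed: Replaced the single flag-accumulating loop with a two-step decomposition: locate the first stop-word index j, then the first target-word index i before j, and return the slice sentences[i:j].
import Mathlib
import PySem

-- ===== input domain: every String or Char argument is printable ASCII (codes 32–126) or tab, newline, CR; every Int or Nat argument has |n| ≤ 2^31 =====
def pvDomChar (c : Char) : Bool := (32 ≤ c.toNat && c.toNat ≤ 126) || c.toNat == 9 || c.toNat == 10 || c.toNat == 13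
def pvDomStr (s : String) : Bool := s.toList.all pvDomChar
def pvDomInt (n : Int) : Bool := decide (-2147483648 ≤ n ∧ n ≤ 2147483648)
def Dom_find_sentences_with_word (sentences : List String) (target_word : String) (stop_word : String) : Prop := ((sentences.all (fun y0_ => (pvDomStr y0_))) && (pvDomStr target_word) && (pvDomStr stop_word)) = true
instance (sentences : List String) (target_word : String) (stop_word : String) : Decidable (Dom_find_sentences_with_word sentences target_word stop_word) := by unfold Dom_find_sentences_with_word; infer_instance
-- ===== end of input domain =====

-- B replaces A's flag-accumulating single loop by locating the stop index j and the first
-- target index i before it, returning the slice sentences[i:j] (objective: simpler).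


-- ===== PORT A =====
-- the for-loop with `break`, state (check, result_list)
def pvGoA (target_word stop_word : String) : List String → Bool → List String → List String
  | [], _, acc => acc
  | s :: rest, check, acc =>
    let check := if PySem.Str.isIn target_word s then true else check
    if PySem.Str.isIn stop_word s then acc
    else pvGoA target_word stop_word rest check (if check then acc ++ [s] else acc)

def find_sentences_with_word (sentences : List String) (target_word : String) (stop_word : String) : List String :=
  pvGoA target_word stop_word sentences false []

-- ===== PORT B =====
-- first loop: index of the first sentence containing stop_word (len(sentences) if none);
-- second loop: first index i in sentences[:j] containing target_word; return sentences[i:j].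
-- The slices [:j] and [i:j] with 0 ≤ i ≤ j ≤ len are exactly take j / (take j).drop i.
def find_sentences_with_word_alt (sentences : List String) (target_word : String) (stop_word : String) : List String :=
  let j := (sentences.findIdx? (fun s => PySem.Str.isIn stop_word s)).getD sentences.length
  match (sentences.take j).findIdx? (fun s => PySem.Str.isIn target_word s) with
  | some i => (sentences.take j).drop i
  | none => []

-- ===== PRECONDITION & SPEC =====
def Spec_find_sentences_with_word (sentences : List String) (target_word : String) (stop_word : String) (out : List String) : Prop := out = find_sentences_with_word_alt sentences target_word stop_word
instance (sentences : List String) (target_word : String) (stop_word : String) (out : List String) : Decidable (Spec_find_sentences_with_word sentences target_word stop_word out) := by unfold Spec_find_sentences_with_word; infer_instance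

-- ===== CLAIM (what is proved, stated in full; the proofs are below) =====
def Claim_equal_find_sentences_with_word : Prop := ∀ (sentences : List String) (target_word : String) (stop_word : String), Dom_find_sentences_with_word sentences target_word stop_word → Spec_find_sentences_with_word sentences target_word stop_word (find_sentences_with_word sentences target_word stop_word)

-- ===== LEMMAS AND PROOFS =====

-- the prefix up to the first index satisfying p is the takeWhile of ¬p
theorem pv_take_findIdx?_getD {α : Type} (p : α → Bool) (l : List α) :
    l.take ((l.findIdx? p).getD l.length) = l.takeWhile (fun x => !p x) := by
  induction l with
  | nil => simp
  | cons x xs ih =>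
    by_cases hx : p x
    · simp [List.findIdx?_cons, hx, List.takeWhile]
    · simp only [List.findIdx?_cons, hx, cond_false, List.takeWhile, Bool.not_false, if_true]
      cases h : xs.findIdx? p with
      | none => simpa [h] using ih
      | some i => simpa [h] using ih

-- once check = True, A appends every sentence until the first one containing stop_word
theorem pvGoA_true (t sw : String) (l : List String) (acc : List String) :
    pvGoA t sw l true acc = acc ++ l.takeWhile (fun s => !PySem.Str.isIn sw s) := by
  induction l generalizing acc with
  | nil => simp [pvGoA]
  | cons s rest ih =>
    by_cases hs : PySem.Chars.isIn sw.toList s.toList = true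
    · simp [pvGoA, hs, List.takeWhile]
    · simp [pvGoA, hs, List.takeWhile, ih]

-- with check = False, A computes B's result appended to the accumulator
theorem pvGoA_false (t sw : String) (l : List String) (acc : List String) :
    pvGoA t sw l false acc = acc ++ find_sentences_with_word_alt l t sw := by
  induction l generalizing acc with
  | nil => simp [pvGoA, find_sentences_with_word_alt]
  | cons s rest ih =>
    by_cases hs : PySem.Chars.isIn sw.toList s.toList = true
    · simp [pvGoA, hs, find_sentences_with_word_alt, List.findIdx?_cons, -List.findIdx?_take]
    · by_cases ht : PySem.Chars.isIn t.toList s.toList = true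
      · -- target found here: A switches to check = True, B slices from this index
        have hT := pv_take_findIdx?_getD (fun x : String => PySem.Chars.isIn sw.toList x.toList) rest
        simp only [pvGoA, ht, hs, PySem.Str.isIn_eq, if_true, if_false, pvGoA_true,
          find_sentences_with_word_alt, List.findIdx?_cons, List.append_assoc, List.singleton_append]
        rw [← hT]
        cases hj : rest.findIdx? (fun x => PySem.Chars.isIn sw.toList x.toList) with
        | none => simp [hj, ht, hs, List.findIdx?_cons, -List.findIdx?_take]
        | some j => simp [hj, ht, hs, List.take_succ_cons, List.findIdx?_cons, -List.findIdx?_take]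
      · -- neither word here: both sides reduce to the tail
        rw [pvGoA]
        simp only [PySem.Str.isIn_eq, ht, if_false, hs, ih, find_sentences_with_word_alt,
          List.findIdx?_cons]
        cases hj : rest.findIdx? (fun x => PySem.Chars.isIn sw.toList x.toList) with
        | none =>
          simp only [hs, ht, hj, cond_false, Option.map_none, Option.getD_none, List.length_cons,
            List.take_succ_cons, List.take_length, if_neg]
          cases hi : rest.findIdx? (fun x => PySem.Chars.isIn t.toList x.toList) with
          | none =>
            refine (ih acc).trans ?_
            simp [find_sentences_with_word_alt, List.findIdx?_cons, ht, hs, hj, hi, -List.findIdx?_take]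
          | some i =>
            refine (ih acc).trans ?_
            simp [find_sentences_with_word_alt, List.findIdx?_cons, ht, hs, hj, hi, -List.findIdx?_take]
        | some j =>
          simp only [hs, ht, hj, cond_false, Option.map_some, Option.getD_some,
            List.take_succ_cons, if_neg]
          cases hi : (rest.take j).findIdx? (fun x => PySem.Chars.isIn t.toList x.toList) with
          | none =>
            refine (ih acc).trans ?_
            simp [find_sentences_with_word_alt, List.findIdx?_cons, ht, hs, hj, hi, -List.findIdx?_take]
          | some i =>
            refine (ih acc).trans ?_
            simp [find_sentences_with_word_alt, List.findIdx?_cons, ht, hs, hj, hi, -List.findIdx?_take]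

-- ===== VERDICT (by name: the statement is the Claim_ definition above) =====
theorem find_sentences_with_word_spec : Claim_equal_find_sentences_with_word := by
  intro sentences target_word stop_word _
  show find_sentences_with_word sentences target_word stop_word = _
  rw [find_sentences_with_word, pvGoA_false]
  simp
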